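-- pv_equiv track=rewrite | github.com/MiguelGontijo/lotofacil-analysis | src/analysis/sequence_analysis.py | _find_consecutive_sequences_in_draw
-- ===== SOURCE A (Python) =====
-- from typing import List, Dict, Tuple, Any
--
-- def _find_consecutive_sequences_in_draw(
--     draw_numbers_sorted: List[int],
--     min_len: int,
--     max_len: int
-- ) -> Dict[int, List[Tuple[int, ...]]]:
--     found_sequences_by_length: Dict[int, List[Tuple[int, ...]]] = {
--         length: [] for length in range(min_len, max_len + 1)
--     }
--     n = len(draw_numbers_sorted)
--     if n == 0 or n < min_len:
--         return found_sequences_by_length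
--     for length_to_check in range(min_len, max_len + 1):
--         if n < length_to_check:
--             continue
--         for i in range(n - length_to_check + 1):
--             current_subsequence = draw_numbers_sorted[i : i + length_to_check]
--             is_consecutive_flag = True
--             for k in range(len(current_subsequence) - 1):
--                 if current_subsequence[k+1] - current_subsequence[k] != 1:
--                     is_consecutive_flag = False
--                     break
--             if is_consecutive_flag:
--                 found_sequences_by_length[length_to_check].append(tuple(current_subsequence))
--     return found_sequences_by_length
-- ===== SOURCE B (Python) =====
-- def _find_consecutive_sequences_in_draw(draw_numbers_sorted, min_len, max_len):
--     n = len(draw_numbers_sorted)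
--     # one pass: maximal consecutive runs as half-open index intervals [start, end)
--     runs = []
--     i = 0
--     while i < n:
--         j = i + 1
--         while j < n and draw_numbers_sorted[j] - draw_numbers_sorted[j - 1] == 1:
--             j += 1
--         runs.append((i, j))
--         i = j
--     # emit every window of each requested length directly from the runs
--     return {
--         length: [
--             tuple(draw_numbers_sorted[s:s + length])
--             for (start, end) in runs
--             for s in range(start, end - length + 1)
--         ]
--         for length in range(min_len, max_len + 1)
--     }
-- ===== Notes on version B (the rewrite author's own statement) =====
-- stated objective: alternative
-- what changed: Instead of testing every window of every length element-by-element, B finds the maximal consecutive runs in one pass and then emits each length's windows directly from the runs without rechecking. Pre_ excludes non-positive min_len, where length-<=0 windows hit Python's negative-slice wraparound, outside the natural domain of sequence lengths >= 1.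
-- outside the precondition, e.g. on _find_consecutive_sequences_in_draw([1, 3], 0, 0): A returns {0: [(), (), ()]}, B returns {0: [(), (), (), ()]}
import Mathlib
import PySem

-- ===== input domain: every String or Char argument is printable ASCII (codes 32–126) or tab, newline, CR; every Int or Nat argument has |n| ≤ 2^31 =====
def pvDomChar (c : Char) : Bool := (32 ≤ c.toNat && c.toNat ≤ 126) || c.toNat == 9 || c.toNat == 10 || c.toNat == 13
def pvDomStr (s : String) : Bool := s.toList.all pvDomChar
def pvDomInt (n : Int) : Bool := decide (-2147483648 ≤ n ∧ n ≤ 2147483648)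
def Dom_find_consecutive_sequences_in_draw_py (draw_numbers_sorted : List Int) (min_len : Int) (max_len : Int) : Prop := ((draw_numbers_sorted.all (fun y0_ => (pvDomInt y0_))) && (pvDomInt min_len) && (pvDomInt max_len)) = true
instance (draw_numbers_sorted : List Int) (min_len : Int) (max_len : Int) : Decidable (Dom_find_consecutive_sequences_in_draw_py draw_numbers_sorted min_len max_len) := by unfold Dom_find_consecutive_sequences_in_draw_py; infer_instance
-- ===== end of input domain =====

-- B replaces A's per-length element-by-element window rechecking by one pass that finds maximal
-- consecutive runs and emits each length's windows directly from them (objective: alternative).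

-- ===== PORT A =====
-- inner 'for k in range(len(sub)-1): … break' flag loop; the break only stops further work once the
-- flag is False, so the fold with a short-circuiting flag computes the same flag
def pvWindowOk (sub : List Int) : Bool :=
  (PySem.List.pyRange 0 ((sub.length : Int) - 1) 1).foldl
    (fun f k =>
      if f = false then f
      else if PySem.List.pyGetD sub (k + 1) 0 - PySem.List.pyGetD sub k 0 ≠ 1 then false
      else f) true

def find_consecutive_sequences_in_draw_py (draw_numbers_sorted : List Int) (min_len : Int) (max_len : Int) : List (Int × List (List Int)) :=
  -- {length: [] for length in range(min_len, max_len+1)}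
  let found0 : PySem.Dict Int (List (List Int)) :=
    (PySem.List.pyRange min_len (max_len + 1) 1).foldl
      (fun d length => d.insert length ([] : List (List Int))) PySem.Dict.empty
  let n := draw_numbers_sorted.length
  if n = 0 ∨ (n : Int) < min_len then found0.items
  else
    ((PySem.List.pyRange min_len (max_len + 1) 1).foldl
      (fun d length_to_check =>
        if (n : Int) < length_to_check then d
        else
          (PySem.List.pyRange 0 ((n : Int) - length_to_check + 1) 1).foldl
            (fun d i =>
              let sub := PySem.List.slice draw_numbers_sorted (some i) (some (i + length_to_check))
              if pvWindowOk sub then d.modify length_to_check [] (fun v => v ++ [sub])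
              else d) d) found0).items

-- ===== PORT B =====
-- inner while loop of Source B: extend the run starting before index j as far as consecutive steps go
def pvRunExtend (draw : List Int) (j : Nat) : Nat :=
  if j < draw.length then
    if PySem.List.pyGetD draw (j : Int) 0 - PySem.List.pyGetD draw ((j : Int) - 1) 0 = 1 then
      pvRunExtend draw (j + 1)
    else j
  else j
termination_by draw.length - j

theorem pvRunExtend_ge (draw : List Int) (j : Nat) : j ≤ pvRunExtend draw j := by
  unfold pvRunExtend
  split
  · split
    · have := pvRunExtend_ge draw (j + 1); omega
    · exact le_refl j
  · exact le_refl j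
termination_by draw.length - j

-- outer while loop of Source B: collect maximal runs as half-open index intervals (start, end)
def pvRunsAux (draw : List Int) (i : Nat) : List (Nat × Nat) :=
  if i < draw.length then
    let j := pvRunExtend draw (i + 1)
    (i, j) :: pvRunsAux draw j
  else []
termination_by draw.length - i
decreasing_by have := pvRunExtend_ge draw (i + 1); omega

def find_consecutive_sequences_in_draw_py_alt (draw_numbers_sorted : List Int) (min_len : Int) (max_len : Int) : List (Int × List (List Int)) :=
  let runs := pvRunsAux draw_numbers_sorted 0
  -- dict comprehension over the distinct keys range(min_len, max_len+1): its items in order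
  (PySem.List.pyRange min_len (max_len + 1) 1).map
    (fun length =>
      (length,
        runs.flatMap
          (fun r =>
            (PySem.List.pyRange (r.1 : Int) ((r.2 : Int) - length + 1) 1).map
              (fun s => PySem.List.slice draw_numbers_sorted (some s) (some (s + length))))))

-- ===== PRECONDITION & SPEC =====
-- Pre_ excludes non-positive min_len, where length-≤0 windows hit Python's negative-slice
-- wraparound, outside the natural domain of sequence lengths ≥ 1.
def Pre_find_consecutive_sequences_in_draw_py (draw_numbers_sorted : List Int) (min_len : Int) (max_len : Int) : Prop := 1 ≤ min_len
instance (draw_numbers_sorted : List Int) (min_len : Int) (max_len : Int) : Decidable (Pre_find_consecutive_sequences_in_draw_py draw_numbers_sorted min_len max_len) := by unfold Pre_find_consecutive_sequences_in_draw_py; infer_instance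
def pvWitness_find_consecutive_sequences_in_draw_py : List Int × Int × Int := ([1, 2, 3, 5], 2, 3)

def Spec_find_consecutive_sequences_in_draw_py (draw_numbers_sorted : List Int) (min_len : Int) (max_len : Int) (out : List (Int × List (List Int))) : Prop := out = find_consecutive_sequences_in_draw_py_alt draw_numbers_sorted min_len max_len
instance (draw_numbers_sorted : List Int) (min_len : Int) (max_len : Int) (out : List (Int × List (List Int))) : Decidable (Spec_find_consecutive_sequences_in_draw_py draw_numbers_sorted min_len max_len out) := by unfold Spec_find_consecutive_sequences_in_draw_py; infer_instance

-- ===== CLAIM (what is proved, stated in full; the proofs are below) =====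
def Claim_equal_find_consecutive_sequences_in_draw_py : Prop := ∀ (draw_numbers_sorted : List Int) (min_len : Int) (max_len : Int), Dom_find_consecutive_sequences_in_draw_py draw_numbers_sorted min_len max_len → Pre_find_consecutive_sequences_in_draw_py draw_numbers_sorted min_len max_len → Spec_find_consecutive_sequences_in_draw_py draw_numbers_sorted min_len max_len (find_consecutive_sequences_in_draw_py draw_numbers_sorted min_len max_len)

-- ===== LEMMAS AND PROOFS =====

-- abbreviations used only by the proofs
def pvW (draw : List Int) (L s : Int) : List Int :=
  PySem.List.slice draw (some s) (some (s + L))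

def pvOk (draw : List Int) (L s : Int) : Bool := pvWindowOk (pvW draw L s)

def pvWA (draw : List Int) (L : Int) : List (List Int) :=
  ((PySem.List.pyRange 0 ((draw.length : Int) - L + 1) 1).filter (fun s => pvOk draw L s)).map
    (pvW draw L)

-- the short-circuiting flag fold is an 'all'
theorem pvFlagFold (sub : List Int) :
    ∀ (is : List Int) (b : Bool),
      is.foldl
        (fun f k =>
          if f = false then f
          else if PySem.List.pyGetD sub (k + 1) 0 - PySem.List.pyGetD sub k 0 ≠ 1 then false
          else f) b
      = (b && is.all (fun k => PySem.List.pyGetD sub (k + 1) 0 - PySem.List.pyGetD sub k 0 == 1)) := by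
  intro is
  induction is with
  | nil => intro b; simp
  | cons k rest ih =>
      intro b
      cases b with
      | false => rw [List.foldl_cons, ih]; simp
      | true =>
        by_cases h : PySem.List.pyGetD sub (k + 1) 0 - PySem.List.pyGetD sub k 0 = 1
        · rw [List.foldl_cons, if_neg (by simp), if_neg (by simp [h]), ih]; simp [h]
        · rw [List.foldl_cons, if_neg (by simp), if_pos h, ih]; simp [h]

theorem pvWindowOk_eq_all (sub : List Int) :
    pvWindowOk sub
      = (PySem.List.pyRange 0 ((sub.length : Int) - 1) 1).all
          (fun k => PySem.List.pyGetD sub (k + 1) 0 - PySem.List.pyGetD sub k 0 == 1) := by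
  unfold pvWindowOk
  rw [pvFlagFold]
  simp

-- pvRunExtend bounds and facts
theorem pvRunExtend_le (draw : List Int) (j : Nat) (h : j ≤ draw.length) :
    pvRunExtend draw j ≤ draw.length := by
  induction j using pvRunExtend.induct (draw := draw) with
  | case1 j h1 h2 ih => rw [pvRunExtend, if_pos h1, if_pos h2]; exact ih (by omega)
  | case2 j h1 h2 => rw [pvRunExtend, if_pos h1, if_neg h2]; omega
  | case3 j h1 => rw [pvRunExtend, if_neg h1]; exact h

theorem pvRunExtend_run (draw : List Int) (j : Nat) :
    ∀ k : Nat, j ≤ k → k < pvRunExtend draw j →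
      PySem.List.pyGetD draw (k : Int) 0 - PySem.List.pyGetD draw ((k : Int) - 1) 0 = 1 := by
  induction j using pvRunExtend.induct (draw := draw) with
  | case1 j h1 h2 ih =>
      intro k hk hk2
      rw [pvRunExtend, if_pos h1, if_pos h2] at hk2
      rcases Nat.eq_or_lt_of_le hk with rfl | hlt
      · exact h2
      · exact ih k (by omega) hk2
  | case2 j h1 h2 =>
      intro k hk hk2
      rw [pvRunExtend, if_pos h1, if_neg h2] at hk2; omega
  | case3 j h1 =>
      intro k hk hk2
      rw [pvRunExtend, if_neg h1] at hk2; omega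

theorem pvRunExtend_break (draw : List Int) (j : Nat)
    (h : pvRunExtend draw j < draw.length) :
    PySem.List.pyGetD draw ((pvRunExtend draw j : Nat) : Int) 0
      - PySem.List.pyGetD draw (((pvRunExtend draw j : Nat) : Int) - 1) 0 ≠ 1 := by
  induction j using pvRunExtend.induct (draw := draw) with
  | case1 j h1 h2 ih =>
      rw [pvRunExtend, if_pos h1, if_pos h2] at h ⊢
      exact ih h
  | case2 j h1 h2 =>
      rw [pvRunExtend, if_pos h1, if_neg h2] at h ⊢
      exact h2
  | case3 j h1 =>
      rw [pvRunExtend, if_neg h1] at h ⊢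
      omega

theorem pvOk_true (draw : List Int) (L : Int) (hL : 1 ≤ L) (i j : Nat) (s : Int)
    (hrun : ∀ k : Nat, i + 1 ≤ k → k < j → PySem.List.pyGetD draw (k : Int) 0 - PySem.List.pyGetD draw ((k : Int) - 1) 0 = 1)
    (hjn : j ≤ draw.length)
    (his : (i : Int) ≤ s) (hsj : s + L ≤ (j : Int)) :
    pvOk draw L s = true := by
  have h0s : 0 ≤ s := le_trans (Int.natCast_nonneg i) his
  have hsL : 0 ≤ s + L := by omega
  unfold pvOk pvW
  rw [PySem.List.slice_toNat draw h0s hsL]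
  set sub := List.take ((s + L).toNat - s.toNat) (draw.drop s.toNat) with hsub
  have hst : (s + L).toNat - s.toNat = L.toNat := by omega
  have hlen : sub.length = L.toNat := by
    rw [hsub, List.length_take, List.length_drop, hst]
    omega
  rw [pvWindowOk_eq_all]
  rw [List.all_eq_true]
  intro k hk
  rw [PySem.List.mem_pyRange_one] at hk
  obtain ⟨hk0, hk1⟩ := hk
  have hklen : k < (sub.length : Int) - 1 := hk1
  have hkn : k.toNat + 1 < sub.length := by omega
  have g1 := PySem.List.pyGetD_eq_getElem sub (i := k + 1) 0 (by omega) (by push_cast; omega)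
  have g2 := PySem.List.pyGetD_eq_getElem sub (i := k) 0 (by omega) (by push_cast; omega)
  rw [g1, g2]
  have e1 : (k + 1).toNat = k.toNat + 1 := by omega
  have hdl : ∀ (m : Nat) (hm : m < sub.length), sub[m] = draw[s.toNat + m]'(by omega) := by
    intro m hm
    simp only [hsub, List.getElem_take, List.getElem_drop]
  simp only [e1, hdl]
  have key := hrun (s.toNat + k.toNat + 1) (by omega) (by omega)
  have c1 : ((s.toNat + k.toNat + 1 : Nat) : Int) - 1 = ((s.toNat + k.toNat : Nat) : Int) := by push_cast; ring
  rw [c1] at key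
  rw [PySem.List.pyGetD_natCast, PySem.List.pyGetD_natCast] at key
  rw [List.getD_eq_getElem _ _ (by omega), List.getD_eq_getElem _ _ (by omega)] at key
  simp only [Nat.add_assoc] at *
  simpa using key
theorem pvOk_false (draw : List Int) (L : Int) (hL : 1 ≤ L) (i j : Nat) (s : Int)
    (hbreak : j < draw.length → PySem.List.pyGetD draw (j : Int) 0 - PySem.List.pyGetD draw ((j : Int) - 1) 0 ≠ 1)
    (his : (i : Int) ≤ s) (hsj : s < (j : Int)) (hcross : (j : Int) < s + L)
    (hsn : s + L ≤ (draw.length : Int)) :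
    pvOk draw L s = false := by
  have h0s : 0 ≤ s := le_trans (Int.natCast_nonneg i) his
  have hjn : j < draw.length := by omega
  have h1j : 1 ≤ j := by omega
  unfold pvOk pvW
  rw [PySem.List.slice_toNat draw h0s (by omega)]
  set sub := List.take ((s + L).toNat - s.toNat) (List.drop s.toNat draw) with hsub
  have hlen : sub.length = L.toNat := by
    rw [hsub, List.length_take, List.length_drop]; omega
  have hdl : ∀ (m : Nat) (hm : m < sub.length), sub[m] = draw[s.toNat + m]'(by omega) := by
    intro m hm
    simp only [hsub, List.getElem_take, List.getElem_drop]
  rw [pvWindowOk_eq_all, List.all_eq_false]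
  refine ⟨(j : Int) - 1 - s, ?_, ?_⟩
  · rw [PySem.List.mem_pyRange_one]; omega
  · set k : Int := (j : Int) - 1 - s with hk
    have g1 := PySem.List.pyGetD_eq_getElem sub (i := k + 1) 0 (by omega) (by push_cast; omega)
    have g2 := PySem.List.pyGetD_eq_getElem sub (i := k) 0 (by omega) (by push_cast; omega)
    rw [g1, g2]
    have e1 : (k + 1).toNat = k.toNat + 1 := by omega
    simp only [e1, hdl]
    have hb := hbreak hjn
    have c1 : ((j : Nat) : Int) - 1 = ((j - 1 : Nat) : Int) := by push_cast [h1j]; ring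
    rw [c1, PySem.List.pyGetD_natCast, PySem.List.pyGetD_natCast,
        List.getD_eq_getElem _ _ (by omega), List.getD_eq_getElem _ _ (by omega)] at hb
    have e2 : s.toNat + (k.toNat + 1) = j := by omega
    have e3 : s.toNat + k.toNat = j - 1 := by omega
    simp only [e2, e3]
    simpa using hb
theorem pvFilterTrue (P : Int → Bool) (a b : Int) (h : ∀ s, a ≤ s → s < b → P s = true) :
    (PySem.List.pyRange a b 1).filter P = PySem.List.pyRange a b 1 := by
  rw [List.filter_eq_self]
  intro s hs
  rw [PySem.List.mem_pyRange_one] at hs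
  exact h s hs.1 hs.2

theorem pvFilterFalse (P : Int → Bool) (a b : Int) (h : ∀ s, a ≤ s → s < b → P s = false) :
    (PySem.List.pyRange a b 1).filter P = [] := by
  rw [List.filter_eq_nil_iff]
  intro s hs
  rw [PySem.List.mem_pyRange_one] at hs
  simp [h s hs.1 hs.2]

theorem pvSplit (draw : List Int) (L : Int) (hL : 1 ≤ L) (i j : Nat)
    (hij : i + 1 ≤ j) (hjn : j ≤ draw.length)
    (hrun : ∀ k : Nat, i + 1 ≤ k → k < j → PySem.List.pyGetD draw (k : Int) 0 - PySem.List.pyGetD draw ((k : Int) - 1) 0 = 1)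
    (hbreak : j < draw.length → PySem.List.pyGetD draw (j : Int) 0 - PySem.List.pyGetD draw ((j : Int) - 1) 0 ≠ 1) :
    (PySem.List.pyRange (i : Int) ((draw.length : Int) - L + 1) 1).filter (fun s => pvOk draw L s)
      = PySem.List.pyRange (i : Int) ((j : Int) - L + 1) 1
        ++ (PySem.List.pyRange (j : Int) ((draw.length : Int) - L + 1) 1).filter (fun s => pvOk draw L s) := by
  set n : Int := (draw.length : Int) with hn
  set hi : Int := n - L + 1 with hhi
  set m : Int := (j : Int) - L + 1 with hm
  have hmhi : m ≤ hi := by omega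
  by_cases hC : hi ≤ (i : Int)
  · rw [PySem.List.pyRange_one_eq_nil hC, PySem.List.pyRange_one_eq_nil (show m ≤ (i:Int) by omega),
        PySem.List.pyRange_one_eq_nil (show hi ≤ (j:Int) by push_cast; omega)]
    simp
  · rw [not_le] at hC
    set q : Int := min (j : Int) hi with hq
    have hiq : (i : Int) ≤ q := by omega
    have hqhi : q ≤ hi := by omega
    rw [PySem.List.pyRange_one_append (i : Int) q hi hiq hqhi, List.filter_append]
    have tail : (PySem.List.pyRange q hi 1).filter (fun s => pvOk draw L s)
        = (PySem.List.pyRange (j : Int) hi 1).filter (fun s => pvOk draw L s) := by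
      by_cases hQ : (j : Int) ≤ hi
      · rw [show q = (j : Int) by omega]
      · rw [PySem.List.pyRange_one_eq_nil (show hi ≤ q by omega),
            PySem.List.pyRange_one_eq_nil (show hi ≤ (j:Int) by omega)]
    have head : (PySem.List.pyRange (i : Int) q 1).filter (fun s => pvOk draw L s)
        = PySem.List.pyRange (i : Int) m 1 := by
      by_cases hM : m ≤ (i : Int)
      · rw [PySem.List.pyRange_one_eq_nil hM]
        apply pvFilterFalse
        intro s hs1 hs2
        exact pvOk_false draw L hL i j s hbreak hs1 (by omega) (by omega) (by omega)
      · rw [not_le] at hM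
        have hmq : m ≤ q := by omega
        rw [PySem.List.pyRange_one_append (i : Int) m q (by omega) hmq, List.filter_append]
        rw [pvFilterTrue _ _ _ (fun s hs1 hs2 => pvOk_true draw L hL i j s hrun hjn hs1 (by omega))]
        rw [pvFilterFalse _ _ _ (fun s hs1 hs2 => pvOk_false draw L hL i j s hbreak (by omega) (by omega) (by omega) (by omega))]
        simp
    rw [tail, head]
theorem pvMain (draw : List Int) (L : Int) (hL : 1 ≤ L) (i : Nat) :
    ((PySem.List.pyRange (i : Int) ((draw.length : Int) - L + 1) 1).filter (fun s => pvOk draw L s)).map (pvW draw L)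
      = (pvRunsAux draw i).flatMap
          (fun r => (PySem.List.pyRange (r.1 : Int) ((r.2 : Int) - L + 1) 1).map
            (fun s => PySem.List.slice draw (some s) (some (s + L)))) := by
  induction i using pvRunsAux.induct (draw := draw) with
  | case1 i hlt j ih =>
      have hj : j = pvRunExtend draw (i + 1) := rfl
      rw [pvRunsAux, if_pos hlt]
      rw [List.flatMap_cons]
      have hjge : i + 1 ≤ j := by rw [hj]; exact pvRunExtend_ge draw (i + 1)
      have hjle : j ≤ draw.length := by rw [hj]; exact pvRunExtend_le draw (i + 1) (by omega)
      have hrun : ∀ k : Nat, i + 1 ≤ k → k < j →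
          PySem.List.pyGetD draw (k : Int) 0 - PySem.List.pyGetD draw ((k : Int) - 1) 0 = 1 := by
        intro k h1 h2; rw [hj] at h2; exact pvRunExtend_run draw (i + 1) k h1 h2
      have hbreak : j < draw.length →
          PySem.List.pyGetD draw (j : Int) 0 - PySem.List.pyGetD draw ((j : Int) - 1) 0 ≠ 1 := by
        intro h; rw [hj] at h ⊢; exact pvRunExtend_break draw (i + 1) h
      rw [pvSplit draw L hL i j hjge hjle hrun hbreak, List.map_append, ih]
      rfl
  | case2 i hlt =>
      rw [pvRunsAux, if_neg hlt]
      rw [PySem.List.pyRange_one_eq_nil (by omega)]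
      simp
theorem pvWA_nil (draw : List Int) (L : Int) (h : (draw.length : Int) < L) :
    pvWA draw L = [] := by
  unfold pvWA
  rw [PySem.List.pyRange_one_eq_nil (by omega)]
  rfl

theorem pvInnerGetD (draw : List Int) (L L' : Int) :
    ∀ (is : List Int) (d : PySem.Dict Int (List (List Int))),
      (is.foldl (fun d i =>
          let sub := PySem.List.slice draw (some i) (some (i + L))
          if pvWindowOk sub then d.modify L [] (fun v => v ++ [sub]) else d) d).getD L' []
      = if L' = L then d.getD L' [] ++ ((is.filter (fun s => pvOk draw L s)).map (pvW draw L))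
        else d.getD L' [] := by
  intro is
  induction is with
  | nil => intro d; split <;> simp
  | cons i rest ih =>
      intro d
      simp only [List.foldl_cons]
      by_cases h : pvWindowOk (PySem.List.slice draw (some i) (some (i + L)))
      · rw [if_pos h, ih]
        have hfc : (i :: rest).filter (fun s => pvOk draw L s)
            = i :: rest.filter (fun s => pvOk draw L s) := by
          rw [List.filter_cons, if_pos (by exact h)]
        rw [hfc]
        by_cases hLL : L' = L
        · subst hLL
          rw [if_pos rfl, if_pos rfl, PySem.Dict.getD_modify]
          rw [if_pos rfl]
          simp [pvW]
        · rw [if_neg hLL, if_neg hLL, PySem.Dict.getD_modify, if_neg hLL]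
      · rw [if_neg h, ih]
        have hfc : (i :: rest).filter (fun s => pvOk draw L s)
            = rest.filter (fun s => pvOk draw L s) := by
          rw [List.filter_cons, if_neg (by simpa using h)]
        rw [hfc]

theorem pvInnerKeys (draw : List Int) (L : Int) :
    ∀ (is : List Int) (d : PySem.Dict Int (List (List Int))), d.contains L = true →
      (is.foldl (fun d i =>
          let sub := PySem.List.slice draw (some i) (some (i + L))
          if pvWindowOk sub then d.modify L [] (fun v => v ++ [sub]) else d) d).keys = d.keys := by
  intro is
  induction is with
  | nil => intro d _; rfl
  | cons i rest ih =>
      intro d hc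
      simp only [List.foldl_cons]
      by_cases h : pvWindowOk (PySem.List.slice draw (some i) (some (i + L)))
      · rw [if_pos h, ih _ (by rw [PySem.Dict.contains_modify]; simp),
            PySem.Dict.keys_modify, PySem.Dict.keys_insert_of_contains _ _ hc]
      · rw [if_neg h, ih _ hc]
theorem pvOuterKeys (draw : List Int) :
    ∀ (ls : List Int) (d : PySem.Dict Int (List (List Int))), (∀ x ∈ ls, d.contains x = true) →
      (ls.foldl (fun d length_to_check =>
          if (draw.length : Int) < length_to_check then d
          else (PySem.List.pyRange 0 ((draw.length : Int) - length_to_check + 1) 1).foldl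
            (fun d i =>
              let sub := PySem.List.slice draw (some i) (some (i + length_to_check))
              if pvWindowOk sub then d.modify length_to_check [] (fun v => v ++ [sub]) else d) d) d).keys
      = d.keys := by
  intro ls
  induction ls with
  | nil => intro d _; rfl
  | cons a rest ih =>
      intro d hc
      simp only [List.foldl_cons]
      by_cases hna : (draw.length : Int) < a
      · rw [if_pos hna, ih _ (fun x hx => hc x (List.mem_cons_of_mem a hx))]
      · rw [if_neg hna]
        have hk := pvInnerKeys draw a (PySem.List.pyRange 0 ((draw.length : Int) - a + 1) 1) d
          (hc a (List.mem_cons_self))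
        rw [ih _ (fun x hx => by
          rw [PySem.Dict.contains_iff_mem_keys, hk, ← PySem.Dict.contains_iff_mem_keys]
          exact hc x (List.mem_cons_of_mem a hx)), hk]

theorem pvOuterGetD (draw : List Int) :
    ∀ (ls : List Int) (d : PySem.Dict Int (List (List Int))), ls.Nodup →
      (∀ x ∈ ls, d.contains x = true) → ∀ L' : Int,
      (ls.foldl (fun d length_to_check =>
          if (draw.length : Int) < length_to_check then d
          else (PySem.List.pyRange 0 ((draw.length : Int) - length_to_check + 1) 1).foldl
            (fun d i =>
              let sub := PySem.List.slice draw (some i) (some (i + length_to_check))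
              if pvWindowOk sub then d.modify length_to_check [] (fun v => v ++ [sub]) else d) d) d).getD L' []
      = if L' ∈ ls then d.getD L' [] ++ pvWA draw L' else d.getD L' [] := by
  intro ls
  induction ls with
  | nil => intro d _ _ L'; simp
  | cons a rest ih =>
      intro d hnd hc L'
      obtain ⟨hna', hndr⟩ := List.nodup_cons.mp hnd
      simp only [List.foldl_cons]
      by_cases hna : (draw.length : Int) < a
      · rw [if_pos hna, ih _ hndr (fun x hx => hc x (List.mem_cons_of_mem a hx))]
        by_cases hLa : L' = a
        · subst hLa
          rw [if_neg hna', if_pos List.mem_cons_self, pvWA_nil draw L' hna]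
          simp
        · by_cases hLr : L' ∈ rest
          · rw [if_pos hLr, if_pos (List.mem_cons_of_mem a hLr)]
          · rw [if_neg hLr, if_neg (by simp [hLa, hLr])]
      · rw [if_neg hna]
        have hk := pvInnerKeys draw a (PySem.List.pyRange 0 ((draw.length : Int) - a + 1) 1) d
          (hc a (List.mem_cons_self))
        rw [ih _ hndr (fun x hx => by
          rw [PySem.Dict.contains_iff_mem_keys, hk, ← PySem.Dict.contains_iff_mem_keys]
          exact hc x (List.mem_cons_of_mem a hx))]
        have hg := pvInnerGetD draw a L' (PySem.List.pyRange 0 ((draw.length : Int) - a + 1) 1) d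
        by_cases hLa : L' = a
        · subst hLa
          rw [if_neg hna', hg, if_pos rfl, if_pos List.mem_cons_self]
          rfl
        · by_cases hLr : L' ∈ rest
          · rw [if_pos hLr, hg, if_neg hLa, if_pos (List.mem_cons_of_mem a hLr)]
          · rw [if_neg hLr, hg, if_neg hLa, if_neg (by simp [hLa, hLr])]

theorem pvD0items (ls : List Int) (h : ls.Nodup) :
    (ls.foldl (fun d length => d.insert length ([] : List (List Int))) PySem.Dict.empty).items
      = ls.map (fun L => (L, ([] : List (List Int)))) := by
  have := PySem.Dict.items_foldl_insert_fresh ls (fun a => a) (fun _ => ([] : List (List Int)))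
    PySem.Dict.empty (fun a _ => PySem.Dict.contains_empty a) (by simpa using h)
  simpa using this
theorem pvD0keys (ls : List Int) (h : ls.Nodup) :
    (ls.foldl (fun d length => d.insert length ([] : List (List Int))) PySem.Dict.empty).keys = ls := by
  simp only [PySem.Dict.keys, pvD0items ls h, List.map_map]
  exact List.map_id' ls

theorem pvD0getD (ls : List Int) (h : ls.Nodup) (L : Int) (hL : L ∈ ls) :
    (ls.foldl (fun d length => d.insert length ([] : List (List Int))) PySem.Dict.empty).getD L [] = [] := by
  apply PySem.Dict.getD_of_mem_items
  · rw [pvD0items ls h]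
    exact List.mem_map_of_mem hL
  · rw [pvD0keys ls h]; exact h

-- ===== VERDICT (by name: the statement is the Claim_ definition above) =====
theorem find_consecutive_sequences_in_draw_py_spec : Claim_equal_find_consecutive_sequences_in_draw_py := by
  unfold Claim_equal_find_consecutive_sequences_in_draw_py
    Spec_find_consecutive_sequences_in_draw_py Pre_find_consecutive_sequences_in_draw_py
  intro draw mn mx _hdom hpre
  simp only [find_consecutive_sequences_in_draw_py, find_consecutive_sequences_in_draw_py_alt]
  have hnd : (PySem.List.pyRange mn (mx + 1) 1).Nodup := PySem.List.nodup_pyRange_one _ _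
  have hLlow : ∀ L ∈ PySem.List.pyRange mn (mx + 1) 1, 1 ≤ L := fun L hL => by
    rw [PySem.List.mem_pyRange_one] at hL; omega
  have hflat : ∀ L : Int, 1 ≤ L →
      (pvRunsAux draw 0).flatMap
        (fun r => (PySem.List.pyRange (r.1 : Int) ((r.2 : Int) - L + 1) 1).map
          (fun s => PySem.List.slice draw (some s) (some (s + L)))) = pvWA draw L := by
    intro L h1
    have h := pvMain draw L h1 0
    rw [Nat.cast_zero] at h
    exact h.symm
  split
  · next hsmall =>
      rw [pvD0items _ hnd]
      apply List.map_congr_left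
      intro L hL
      have h1 := hLlow L hL
      have hbig : (draw.length : Int) < L := by
        rw [PySem.List.mem_pyRange_one] at hL
        rcases hsmall with h0 | hlt
        · rw [h0]; omega
        · omega
      simp only [hflat L h1, pvWA_nil draw L hbig]
  · next hsmall =>
      have hkeys0 := pvD0keys (PySem.List.pyRange mn (mx + 1) 1) hnd
      have hcont : ∀ x ∈ PySem.List.pyRange mn (mx + 1) 1,
          ((PySem.List.pyRange mn (mx + 1) 1).foldl
            (fun d length => d.insert length ([] : List (List Int))) PySem.Dict.empty).contains x = true := by
        intro x hx
        rw [PySem.Dict.contains_iff_mem_keys, hkeys0]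
        exact hx
      have hkeys := pvOuterKeys draw (PySem.List.pyRange mn (mx + 1) 1)
        ((PySem.List.pyRange mn (mx + 1) 1).foldl
          (fun d length => d.insert length ([] : List (List Int))) PySem.Dict.empty) hcont
      rw [PySem.Dict.items_eq_map_keys _ (by rw [hkeys, hkeys0]; exact hnd) [], hkeys, hkeys0]
      apply List.map_congr_left
      intro L hL
      simp only [pvOuterGetD draw _ _ hnd hcont L, if_pos hL, pvD0getD _ hnd L hL,
        List.nil_append, hflat L (hLlow L hL)]
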